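-- pv_equiv track=rewrite | github.com/jongmung/Coding_Study | PCCE.py | scan_minerals
-- ===== SOURCE A (Python) =====
-- def scan_minerals(minerals):
--     i = 0
--     counted = []
--     flag = True
--     while flag:
--         target = []
--         if i + 5 < len(minerals):
--             target = minerals[i:i + 5]
--         else:
--             target = minerals[i:]
--             flag = False
--         dias, irons, stones = target.count('diamond'), target.count('iron'), target.count('stone')
--         counted.append([dias, irons, stones])
--         i += 5
--     counted.sort(key=lambda _: (-_[0], -_[1]))
--     return counted
-- ===== SOURCE B (Python) =====
-- def scan_minerals(minerals):
--     counted = [[0, 0, 0]]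
--     for idx, m in enumerate(minerals):
--         chunk = idx // 5
--         while len(counted) <= chunk:
--             counted.append([0, 0, 0])
--         if m == 'diamond':
--             counted[chunk][0] += 1
--         elif m == 'iron':
--             counted[chunk][1] += 1
--         elif m == 'stone':
--             counted[chunk][2] += 1
--     counted.sort(key=lambda c: (-c[0], -c[1]))
--     return counted
-- ===== Notes on version B (the rewrite author's own statement) =====
-- stated objective: alternative
-- what changed: A repeatedly slices the list into 5-element chunks and runs three count() scans per chunk; B makes a single enumerate pass, bucketing each element by index // 5 into an on-demand-grown counts table (the initial [0,0,0] bucket reproduces the one-chunk result on empty input), then sorts the same way.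
import Mathlib
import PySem

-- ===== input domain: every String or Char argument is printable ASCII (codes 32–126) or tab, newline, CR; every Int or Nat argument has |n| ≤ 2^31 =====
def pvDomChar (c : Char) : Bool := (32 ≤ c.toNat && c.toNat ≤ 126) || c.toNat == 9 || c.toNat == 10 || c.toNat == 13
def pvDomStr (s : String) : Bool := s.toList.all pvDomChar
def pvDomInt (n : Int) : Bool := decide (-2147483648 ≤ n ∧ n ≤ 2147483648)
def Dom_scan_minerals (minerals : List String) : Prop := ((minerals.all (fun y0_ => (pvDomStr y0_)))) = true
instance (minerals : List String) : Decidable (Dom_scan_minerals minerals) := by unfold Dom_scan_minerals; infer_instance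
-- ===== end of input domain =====

-- B replaces A's slice-a-chunk-then-count-three-times loop by a single per-element
-- bucketing pass (index // 5 picks the bucket, which is grown on demand); same outputs.

-- ===== PORT A =====
def pvTripleOf (t : List String) : List Int :=
  [(PySem.List.count t "diamond" : Int), (PySem.List.count t "iron" : Int),
   (PySem.List.count t "stone" : Int)]

-- the while-loop of A: i advances by 5; the last round takes minerals[i:] and stops
def pvLoopA (minerals : List String) (i : Nat) : List (List Int) :=
  if i + 5 < minerals.length then
    pvTripleOf (PySem.List.slice minerals (some (i : Int)) (some ((i : Int) + 5)))
      :: pvLoopA minerals (i + 5)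
  else
    [pvTripleOf (PySem.List.slice minerals (some (i : Int)) none)]
termination_by minerals.length - i

def scan_minerals (minerals : List String) : List (List Int) :=
  PySem.List.sorted2 (pvLoopA minerals 0)
    (fun c => -(PySem.List.pyGetD c 0 0)) (fun c => -(PySem.List.pyGetD c 1 0))

-- ===== PORT B =====
-- the 'while len(counted) <= chunk: counted.append([0,0,0])' loop of Source B
def pvExtend (counted : List (List Int)) (chunk : Int) : List (List Int) :=
  if (counted.length : Int) ≤ chunk then pvExtend (counted ++ [[0, 0, 0]]) chunk else counted
termination_by (chunk + 1 - counted.length).toNat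
decreasing_by simp; omega

-- counted[chunk][j] += 1 (inner list update)
def pvBumpAt (c : List Int) (j : Int) : List Int :=
  PySem.List.pySetD c j (PySem.List.pyGetD c j 0 + 1)

-- one iteration of Source B's for loop
def pvStep (counted : List (List Int)) (nm : Int × String) : List (List Int) :=
  let chunk := PySem.Int.floordiv nm.1 5
  let counted := pvExtend counted chunk
  if nm.2 == "diamond" then
    PySem.List.pySetD counted chunk (pvBumpAt (PySem.List.pyGetD counted chunk []) 0)
  else if nm.2 == "iron" then
    PySem.List.pySetD counted chunk (pvBumpAt (PySem.List.pyGetD counted chunk []) 1)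
  else if nm.2 == "stone" then
    PySem.List.pySetD counted chunk (pvBumpAt (PySem.List.pyGetD counted chunk []) 2)
  else counted

def scan_minerals_alt (minerals : List String) : List (List Int) :=
  PySem.List.sorted2 ((PySem.List.enumerate minerals).foldl pvStep [[0, 0, 0]])
    (fun c => -(PySem.List.pyGetD c 0 0)) (fun c => -(PySem.List.pyGetD c 1 0))

-- ===== PRECONDITION & SPEC =====
def Spec_scan_minerals (minerals : List String) (out : List (List Int)) : Prop := out = scan_minerals_alt minerals
instance (minerals : List String) (out : List (List Int)) : Decidable (Spec_scan_minerals minerals out) := by unfold Spec_scan_minerals; infer_instance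

-- ===== CLAIM (what is proved, stated in full; the proofs are below) =====
def Claim_equal_scan_minerals : Prop := ∀ (minerals : List String), Dom_scan_minerals minerals → Spec_scan_minerals minerals (scan_minerals minerals)

-- ===== LEMMAS AND PROOFS =====

-- canonical chunked counts: p is the (partial, < 5 elements) current bucket's contents
def pvChunk (p : List String) (l : List String) : List (List Int) :=
  match l with
  | [] => [pvTripleOf p]
  | m :: rest =>
    if p.length = 4 then
      match rest with
      | [] => [pvTripleOf (p ++ [m])]
      | _ :: _ => pvTripleOf (p ++ [m]) :: pvChunk [] rest
    else pvChunk (p ++ [m]) rest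

lemma pvChunk_eq (l : List String) :
    pvChunk [] l =
      if 5 < l.length then pvTripleOf (l.take 5) :: pvChunk [] (l.drop 5)
      else [pvTripleOf l] := by
  rcases l with _ | ⟨a, _ | ⟨b, _ | ⟨c, _ | ⟨d, _ | ⟨e, rest⟩⟩⟩⟩⟩ <;>
    [skip; skip; skip; skip; skip; rcases rest with _ | ⟨f, rest⟩] <;>
    simp [pvChunk]

lemma pvLoopA_eq (l : List String) (i : Nat) : pvLoopA l i = pvChunk [] (l.drop i) := by
  rw [pvLoopA]
  by_cases h : i + 5 < l.length
  · have h5 : ((i : Int) + 5) = ((i + 5 : Nat) : Int) := by push_cast; ring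
    rw [if_pos h, h5, PySem.List.slice_natCast, pvLoopA_eq l (i + 5), pvChunk_eq (l.drop i)]
    have hlen : 5 < (l.drop i).length := by simp; omega
    rw [if_pos hlen]
    congr 2
    · simp
    · simp [List.drop_drop]
  · rw [if_neg h, PySem.List.slice_from_natCast, pvChunk_eq (l.drop i)]
    have hlen : ¬ 5 < (l.drop i).length := by simp; omega
    rw [if_neg hlen]
termination_by l.length - i

lemma pvFloordiv5 (a j : Nat) (h : j < 5) :
    PySem.Int.floordiv (5 * (a : Int) + (j : Int)) 5 = a := by
  have h0 : ((j : Int)).fdiv 5 = 0 := by interval_cases j <;> decide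
  have := Int.add_mul_fdiv_left (j : Int) (a : Int) (by norm_num : (5 : Int) ≠ 0)
  simp [PySem.Int.floordiv]
  rw [add_comm, this, h0, zero_add]

lemma pvExtend_done (acc : List (List Int)) (c : Int) (h : c < (acc.length : Int)) :
    pvExtend acc c = acc := by
  unfold pvExtend
  simp [not_le.mpr h]

lemma pvExtend_one (acc : List (List Int)) :
    pvExtend acc ((acc.length : Nat) : Int) = acc ++ [[0, 0, 0]] := by
  rw [pvExtend]
  rw [if_pos le_rfl]
  exact pvExtend_done _ _ (by simp)

lemma pvGetD_append_last (acc : List (List Int)) (t : List Int) :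
    PySem.List.pyGetD (acc ++ [t]) ((acc.length : Nat) : Int) [] = t := by
  simp [PySem.List.pyGetD_natCast, List.getD]

lemma pvSetD_append_last (acc : List (List Int)) (t v : List Int) :
    PySem.List.pySetD (acc ++ [t]) ((acc.length : Nat) : Int) v = acc ++ [v] := by
  simp [PySem.List.pySetD_natCast]

lemma pvBump0 (d i s : Int) : pvBumpAt [d, i, s] 0 = [d + 1, i, s] := by
  simp [pvBumpAt, PySem.List.pySetD, PySem.List.pySet?, PySem.List.pyGetD, PySem.List.pyGet?, PySem.List.pyIdx?]

lemma pvBump1 (d i s : Int) : pvBumpAt [d, i, s] 1 = [d, i + 1, s] := by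
  simp [pvBumpAt, PySem.List.pySetD, PySem.List.pySet?, PySem.List.pyGetD, PySem.List.pyGet?, PySem.List.pyIdx?]

lemma pvBump2 (d i s : Int) : pvBumpAt [d, i, s] 2 = [d, i, s + 1] := by
  simp [pvBumpAt, PySem.List.pySetD, PySem.List.pySet?, PySem.List.pyGetD, PySem.List.pyGet?, PySem.List.pyIdx?]

-- one pvStep, given that the extend loop leaves the current bucket's triple last
lemma pvStep_any (acc : List (List Int)) (p : List String) (m : String) (hp : p.length < 5)
    (s : List (List Int))
    (hext : pvExtend s ((acc.length : Nat) : Int) = acc ++ [pvTripleOf p]) :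
    pvStep s ((5 * (acc.length : Int) + (p.length : Int)), m)
      = acc ++ [pvTripleOf (p ++ [m])] := by
  simp only [pvStep, pvFloordiv5 acc.length p.length hp, hext, pvGetD_append_last,
    pvSetD_append_last]
  by_cases h1 : m = "diamond"
  · simp [h1, pvTripleOf, pvBump0]
  by_cases h2 : m = "iron"
  · simp [h2, pvTripleOf, pvBump1]
  by_cases h3 : m = "stone"
  · simp [h3, pvTripleOf, pvBump2]
  · simp [h1, h2, h3, pvTripleOf]

theorem pvFold_chunk (n : Nat) : ∀ (l : List String), l.length ≤ n → ∀ (p : List String) (acc : List (List Int)), p.length < 5 →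
    (PySem.List.enumerate l (5 * (acc.length : Int) + (p.length : Int))).foldl pvStep
        (acc ++ [pvTripleOf p]) = acc ++ pvChunk p l := by
  induction n with
  | zero =>
    intro l hl p acc hp
    have : l = [] := by cases l <;> simp_all
    subst this
    simp [PySem.List.enumerate, pvChunk]
  | succ n ih =>
    intro l hl p acc hp
    cases l with
    | nil => simp [PySem.List.enumerate, pvChunk]
    | cons m rest =>
      rw [PySem.List.enumerate_cons, List.foldl_cons,
        pvStep_any acc p m hp _ (pvExtend_done _ _ (by simp))]
      by_cases h4 : p.length = 4
      · cases rest with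
        | nil => simp [PySem.List.enumerate, pvChunk, h4]
        | cons r rs =>
          rw [PySem.List.enumerate_cons, List.foldl_cons]
          have hidx1 : 5 * (acc.length : Int) + (p.length : Int) + 1
              = 5 * (((acc ++ [pvTripleOf (p ++ [m])]).length : Nat) : Int) + ((([] : List String).length : Nat) : Int) := by
            simp; omega
          rw [hidx1, pvStep_any (acc ++ [pvTripleOf (p ++ [m])]) [] r (by norm_num) _ ?hext]
          case hext =>
            rw [pvExtend_one]
            simp [pvTripleOf, PySem.List.count_eq]
          simp only [List.nil_append]
          have hidx2 : 5 * (((acc ++ [pvTripleOf (p ++ [m])]).length : Nat) : Int) + ((([] : List String).length : Nat) : Int) + 1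
              = 5 * (((acc ++ [pvTripleOf (p ++ [m])]).length : Nat) : Int) + (([r].length : Nat) : Int) := by
            simp
          rw [hidx2, ih rs (by simp at hl; omega) [r] (acc ++ [pvTripleOf (p ++ [m])]) (by norm_num)]
          have : pvChunk p (m :: r :: rs) = pvTripleOf (p ++ [m]) :: pvChunk [r] rs := by
            simp [pvChunk, h4]
          rw [this, List.append_assoc]
          rfl
      · have hidx : 5 * (acc.length : Int) + (p.length : Int) + 1
            = 5 * (acc.length : Int) + (((p ++ [m]).length : Nat) : Int) := by
          simp; omega
        rw [hidx, ih rest (by simp at hl; omega) (p ++ [m]) acc (by simp; omega)]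
        have : pvChunk p (m :: rest) = pvChunk (p ++ [m]) rest := by
          simp [pvChunk, h4]
        rw [this]

-- ===== VERDICT (by name: the statement is the Claim_ definition above) =====
theorem scan_minerals_spec : Claim_equal_scan_minerals := by
  intro minerals _
  unfold Spec_scan_minerals scan_minerals scan_minerals_alt
  have hA := pvLoopA_eq minerals 0
  have hB := pvFold_chunk minerals.length minerals le_rfl [] [] (by norm_num)
  simp at hA hB ⊢
  rw [hA, ← hB]
  rfl
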